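-- pv_equiv track=rewrite | github.com/susanyiwenwang/tictactoe | main.py | find_placement
-- ===== SOURCE A (Python) =====
-- sample = [[" a ", "|", " b ", "|", " c "], [" d ", "|", " e ", "|", " f "], [" g ", "|", " h ", "|", " i "]]
--
-- def find_placement(player_move):
--     index_1 = None
--     index_2 = None
--     edited_move = f" {player_move} "
--     for board_list in sample:
--         if edited_move in board_list:
--             index_1 = sample.index(board_list)
--             index_2 = board_list.index(edited_move)
--     return index_1, index_2
-- ===== SOURCE B (Python) =====
-- sample = [[" a ", "|", " b ", "|", " c "], [" d ", "|", " e ", "|", " f "], [" g ", "|", " h ", "|", " i "]]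
--
-- # index table built once: cell string -> (row, col); one dict lookup per call
-- _TABLE = {cell: (r, c) for r, row in enumerate(sample) for c, cell in enumerate(row)}
--
-- def find_placement(player_move):
--     return _TABLE.get(f" {player_move} ", (None, None))
-- ===== Notes on version B (the rewrite author's own statement) =====
-- stated objective: idiomatic
-- what changed: Replaces the per-call scan over board rows (membership test plus two .index scans) by a lookup table precomputed once from sample with nested enumerate, so each call is a single dict.get.
import Mathlib
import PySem

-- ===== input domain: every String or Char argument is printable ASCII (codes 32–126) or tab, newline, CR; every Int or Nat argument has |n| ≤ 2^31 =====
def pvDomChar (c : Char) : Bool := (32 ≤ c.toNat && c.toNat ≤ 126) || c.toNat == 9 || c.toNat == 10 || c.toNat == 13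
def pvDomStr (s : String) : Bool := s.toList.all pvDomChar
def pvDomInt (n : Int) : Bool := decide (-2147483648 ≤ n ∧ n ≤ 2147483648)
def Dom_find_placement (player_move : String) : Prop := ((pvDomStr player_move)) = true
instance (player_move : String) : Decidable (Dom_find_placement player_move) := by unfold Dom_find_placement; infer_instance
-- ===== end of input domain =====

-- B replaces A's per-call scan over board rows by a lookup table precomputed once from sample (idiomatic; same observable results).


-- the module-level board literal, shared context of both programs
def sample : List (List String) :=
  [[" a ", "|", " b ", "|", " c "], [" d ", "|", " e ", "|", " f "], [" g ", "|", " h ", "|", " i "]]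

-- ===== PORT A =====
-- the for-loop with its two-component state; list.index is PySem.List.index? (always `some` here, since the
-- indexed element was just found by the membership test, so Python's ValueError is unreachable)
def find_placement (player_move : String) : Option Int × Option Int :=
  let edited_move := " " ++ player_move ++ " "
  sample.foldl
    (fun (st : Option Int × Option Int) board_list =>
      if edited_move ∈ board_list then
        ((PySem.List.index? sample board_list).map (fun n => (n : Int)),
         (PySem.List.index? board_list edited_move).map (fun n => (n : Int)))
      else st)
    (none, none)

-- ===== PORT B =====
-- the dict comprehension: cell ↦ (row, col), built once by nested enumerate over sample
def pvTable : PySem.Dict String (Option Int × Option Int) :=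
  (PySem.List.enumerate sample 0).foldl
    (fun d rrow =>
      (PySem.List.enumerate rrow.2 0).foldl
        (fun d ccell => d.insert ccell.2 (some rrow.1, some ccell.1)) d)
    PySem.Dict.empty

def find_placement_alt (player_move : String) : Option Int × Option Int :=
  pvTable.getD (" " ++ player_move ++ " ") (none, none)

-- ===== PRECONDITION & SPEC =====
def Spec_find_placement (player_move : String) (out : Option Int × Option Int) : Prop := out = find_placement_alt player_move
instance (player_move : String) (out : Option Int × Option Int) : Decidable (Spec_find_placement player_move out) := by unfold Spec_find_placement; infer_instance

-- ===== CLAIM (what is proved, stated in full; the proofs are below) =====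
def Claim_equal_find_placement : Prop := ∀ (player_move : String), Dom_find_placement player_move → Spec_find_placement player_move (find_placement player_move)

-- ===== LEMMAS AND PROOFS =====

-- the padded move always starts with a space, so it can never be the one non-cell board entry "|"
lemma padded_ne_bar (m : String) : " " ++ m ++ " " ≠ "|" := by
  intro h
  apply_fun String.toList at h
  simp at h

-- for any key other than "|", the loop of A and the table lookup of B agree
lemma core_eq (e : String) (hbar : e ≠ "|") :
    sample.foldl
      (fun (st : Option Int × Option Int) board_list =>
        if e ∈ board_list then
          ((PySem.List.index? sample board_list).map (fun n => (n : Int)),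
           (PySem.List.index? board_list e).map (fun n => (n : Int)))
        else st)
      (none, none)
    = pvTable.getD e (none, none) := by
  by_cases ha : e = " a " <;> by_cases hb : e = " b " <;> by_cases hc : e = " c " <;>
  by_cases hd : e = " d " <;> by_cases he : e = " e " <;> by_cases hf : e = " f " <;>
  by_cases hg : e = " g " <;> by_cases hh : e = " h " <;> by_cases hi : e = " i " <;>
    simp_all [sample, pvTable, PySem.Dict.getD, PySem.Dict.get?, PySem.Dict.empty,
      PySem.Dict.insert, PySem.List.enumerate, PySem.List.index?] <;>
    first
      | decide
      | simp [List.find?,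
          beq_eq_false_iff_ne.mpr (Ne.symm ha), beq_eq_false_iff_ne.mpr (Ne.symm hb),
          beq_eq_false_iff_ne.mpr (Ne.symm hc), beq_eq_false_iff_ne.mpr (Ne.symm hd),
          beq_eq_false_iff_ne.mpr (Ne.symm he), beq_eq_false_iff_ne.mpr (Ne.symm hf),
          beq_eq_false_iff_ne.mpr (Ne.symm hg), beq_eq_false_iff_ne.mpr (Ne.symm hh),
          beq_eq_false_iff_ne.mpr (Ne.symm hi), beq_eq_false_iff_ne.mpr (Ne.symm hbar)]

-- ===== VERDICT (by name: the statement is the Claim_ definition above) =====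
theorem find_placement_spec : Claim_equal_find_placement := by
  intro m _
  unfold Spec_find_placement find_placement find_placement_alt
  exact core_eq (" " ++ m ++ " ") (padded_ne_bar m)
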